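-- pv_equiv track=rewrite | github.com/Wolfidy7/Projet-application | app/blog/test_gentoo.py | verify_apache
-- ===== SOURCE A (Python) =====
-- def verify_apache(section):
--     if section is None:
--         return False
--
--     apache_started = False
--     proftpd_started = False
--     in_default_runlevel = False
--
--     for line in section:
--         if "Runlevel: default" in line:
--             in_default_runlevel = True
--         if "apache2" in line and in_default_runlevel:
--             apache_started = True
--         if "proftpd" in line  and in_default_runlevel:
--             proftpd_started = True
--
--     if apache_started and proftpd_started:
--         return True
--
--     return False
-- ===== SOURCE B (Python) =====
-- def verify_apache(section):
--     if section is None: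
--         return False
--     lines = list(section)
--     tail = []
--     for i, l in enumerate(lines):
--         if "Runlevel: default" in l:
--             tail = lines[i:]
--             break
--     return any("apache2" in l for l in tail) and any("proftpd" in l for l in tail)
-- ===== Notes on version B (the rewrite author's own statement) =====
-- stated objective: simpler
-- what changed: Replaces the fused three-flag stateful loop with a locate-then-scan decomposition: drop lines up to the first 'Runlevel: default' marker, then two independent any() scans over the tail.
import Mathlib
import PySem

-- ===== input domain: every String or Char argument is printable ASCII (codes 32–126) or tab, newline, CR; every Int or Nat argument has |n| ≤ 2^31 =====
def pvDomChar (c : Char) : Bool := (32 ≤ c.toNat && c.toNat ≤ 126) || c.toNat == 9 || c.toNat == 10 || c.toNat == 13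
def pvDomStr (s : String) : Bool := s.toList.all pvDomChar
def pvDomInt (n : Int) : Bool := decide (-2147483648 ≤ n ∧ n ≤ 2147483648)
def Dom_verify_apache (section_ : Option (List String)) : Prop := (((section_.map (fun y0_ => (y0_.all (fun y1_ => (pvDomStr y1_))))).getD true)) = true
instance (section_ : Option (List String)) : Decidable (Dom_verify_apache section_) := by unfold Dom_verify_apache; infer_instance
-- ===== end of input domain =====

-- B replaces A's fused three-flag loop by: drop lines up to the first "Runlevel: default"
-- marker, then two independent membership scans over the tail (objective: simpler).
-- ===== PORT A =====
def verify_apache (section_ : Option (List String)) : Bool :=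
  match section_ with
  | none => false
  | some sec =>
    let st := sec.foldl (fun (st : Bool × Bool × Bool) line =>
      let d := st.2.2 || PySem.Str.isIn "Runlevel: default" line
      let a := st.1 || (PySem.Str.isIn "apache2" line && d)
      let p := st.2.1 || (PySem.Str.isIn "proftpd" line && d)
      (a, p, d)) (false, false, false)
    st.1 && st.2.1

-- ===== PORT B =====
def verify_apache_alt (section_ : Option (List String)) : Bool :=
  match section_ with
  | none => false
  | some sec =>
    let tail := match sec.findIdx? (fun l => PySem.Str.isIn "Runlevel: default" l) with
      | none => []
      | some i => sec.drop i
    (tail.any (fun l => PySem.Str.isIn "apache2" l)) &&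
      (tail.any (fun l => PySem.Str.isIn "proftpd" l))

-- ===== PRECONDITION & SPEC =====
def Spec_verify_apache (section_ : Option (List String)) (out : Bool) : Prop := out = verify_apache_alt section_
instance (section_ : Option (List String)) (out : Bool) : Decidable (Spec_verify_apache section_ out) := by unfold Spec_verify_apache; infer_instance

-- ===== CLAIM =====
def Claim_equal_verify_apache : Prop := ∀ (section_ : Option (List String)), Dom_verify_apache section_ → Spec_verify_apache section_ (verify_apache section_)

-- ===== LEMMAS AND PROOFS =====
-- once in the default runlevel, the fold just ORs in the two membership scans
theorem pvFold_after (m ap pf : String → Bool) (xs : List String) : ∀ (a p : Bool),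
    xs.foldl (fun (st : Bool × Bool × Bool) l =>
        let d := st.2.2 || m l
        (st.1 || (ap l && d), st.2.1 || (pf l && d), d)) (a, p, true) =
      (a || xs.any ap, p || xs.any pf, true) := by
  induction xs with
  | nil => simp
  | cons h t ih =>
    intro a p
    simp [List.foldl_cons, ih, Bool.or_assoc]

-- locating the first marker and keeping the rest is dropping the marker-free prefix
theorem pvFind_drop (m : String → Bool) (xs : List String) :
    (match xs.findIdx? m with
      | none => ([] : List String)
      | some i => xs.drop i) = xs.dropWhile (fun l => !(m l)) := by
  induction xs with
  | nil => simp
  | cons h t ih =>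
    by_cases hm : m h = true
    · simp [List.findIdx?_cons, hm]
    · simp only [Bool.not_eq_true] at hm
      simp only [List.findIdx?_cons, hm, List.dropWhile_cons, Bool.not_false, if_true]
      cases hf : t.findIdx? m with
      | none => simpa [hf] using ih
      | some i => simpa [hf] using ih

-- the fused loop equals the locate-then-scan decomposition, for any predicates
theorem pvGen (m ap pf : String → Bool) (xs : List String) :
    ((xs.foldl (fun (st : Bool × Bool × Bool) l =>
        let d := st.2.2 || m l
        (st.1 || (ap l && d), st.2.1 || (pf l && d), d)) (false, false, false)).1 &&
     (xs.foldl (fun (st : Bool × Bool × Bool) l =>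
        let d := st.2.2 || m l
        (st.1 || (ap l && d), st.2.1 || (pf l && d), d)) (false, false, false)).2.1) =
      ((xs.dropWhile (fun l => !(m l))).any ap && (xs.dropWhile (fun l => !(m l))).any pf) := by
  induction xs with
  | nil => simp
  | cons h t ih =>
    by_cases hm : m h = true
    · simp [hm, pvFold_after]
    · simp only [Bool.not_eq_true] at hm
      simp [hm, ih]

-- ===== VERDICT =====
theorem verify_apache_spec : Claim_equal_verify_apache := by
  intro section_ _
  unfold Spec_verify_apache verify_apache verify_apache_alt
  cases section_ with
  | none => rfl
  | some sec =>
    show _ = ((match sec.findIdx? (fun l => PySem.Str.isIn "Runlevel: default" l) with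
        | none => ([] : List String)
        | some i => sec.drop i).any (fun l => PySem.Str.isIn "apache2" l) &&
      (match sec.findIdx? (fun l => PySem.Str.isIn "Runlevel: default" l) with
        | none => ([] : List String)
        | some i => sec.drop i).any (fun l => PySem.Str.isIn "proftpd" l))
    rw [pvFind_drop]
    exact pvGen (fun l => PySem.Str.isIn "Runlevel: default" l)
      (fun l => PySem.Str.isIn "apache2" l) (fun l => PySem.Str.isIn "proftpd" l) sec
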